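-- pv_equiv track=rewrite | github.com/Amin-Mohamed1/ConnectFourGame | Application/Services/HeuristicCriterias/CouldConnectFourInOneMove.py | __twos_to_fours_vertical
-- ===== SOURCE A (Python) =====
-- def __twos_to_fours_vertical(board: list[list[str]], piece: str) -> int:
--     score: int = 0
--     for col in range(len(board[0])):
--         piece_count: int = 0
--         for row in range(len(board)):
--             if board[row][col] == piece:
--                 piece_count += 1
--                 if piece_count >= 2:
--                     if row + 2 < len(board) and board[row + 1][col] == '' and board[row + 2][col] == piece:
--                         score += 1
--                     if row - 3 >= 0 and board[row - 2][col] == '' and board[row - 3][col] == piece: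
--                         score += 1
--             else:
--                 piece_count = 0
--     return score
-- ===== SOURCE B (Python) =====
-- def __twos_to_fours_vertical(board: list[list[str]], piece: str) -> int:
--     # Stateless sliding-window rewrite: each threat counted by A is exactly a
--     # 4-cell vertical window equal to [piece, piece, '', piece] or [piece, '', piece, piece].
--     width = len(board[0])
--     pat_a = [piece, piece, '', piece]
--     pat_b = [piece, '', piece, piece]
--     score = 0
--     for col in range(width):
--         for top in range(len(board) - 3):
--             window = [board[top][col], board[top + 1][col], board[top + 2][col], board[top + 3][col]]
--             if window == pat_a:
--                 score += 1
--             if window == pat_b: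
--                 score += 1
--     return score
-- ===== Notes on version B (the rewrite author's own statement) =====
-- stated objective: alternative
-- what changed: Replaced A's stateful scan that maintains a running consecutive-piece counter per column with a stateless sliding-window pass that counts, for each column, the 4-cell vertical windows equal to [piece,piece,'',piece] or [piece,'',piece,piece].
import Mathlib
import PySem

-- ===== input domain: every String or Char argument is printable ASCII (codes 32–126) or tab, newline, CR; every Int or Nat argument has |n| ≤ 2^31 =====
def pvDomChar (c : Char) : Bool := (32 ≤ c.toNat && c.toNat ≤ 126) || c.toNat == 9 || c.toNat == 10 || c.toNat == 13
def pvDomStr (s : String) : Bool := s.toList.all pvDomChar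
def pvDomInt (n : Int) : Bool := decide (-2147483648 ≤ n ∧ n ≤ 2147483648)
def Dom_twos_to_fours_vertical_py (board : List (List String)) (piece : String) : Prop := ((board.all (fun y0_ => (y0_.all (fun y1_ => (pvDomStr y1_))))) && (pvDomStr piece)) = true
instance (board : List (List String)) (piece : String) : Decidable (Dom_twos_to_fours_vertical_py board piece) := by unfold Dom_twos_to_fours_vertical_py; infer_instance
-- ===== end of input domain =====

-- B replaces A's running consecutive-piece counter with a stateless sliding-window
-- pattern count over fixed 4-cell vertical windows (alternative decomposition, same cost).


-- ===== PORT A =====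
-- board[row][col], total with default "" (Pre_ excludes the inputs where Python raises IndexError)
def pvCell (board : List (List String)) (row col : Int) : String :=
  ((PySem.List.pyGet? board row).bind (fun r => PySem.List.pyGet? r col)).getD ""

def twos_to_fours_vertical_py (board : List (List String)) (piece : String) : Int :=
  ((PySem.List.pyRange 0 (((PySem.List.pyGet? board 0).getD []).length : Int) 1).foldl
    (fun (score : Int) (col : Int) =>
      (((PySem.List.pyRange 0 (board.length : Int) 1).foldl
        (fun (st : Int × Int) (row : Int) =>
          if pvCell board row col = piece then
            if st.2 + 1 ≥ 2 then
              let s1 := if row + 2 < (board.length : Int) ∧ pvCell board (row + 1) col = "" ∧ pvCell board (row + 2) col = piece then st.1 + 1 else st.1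
              let s2 := if row - 3 ≥ 0 ∧ pvCell board (row - 2) col = "" ∧ pvCell board (row - 3) col = piece then s1 + 1 else s1
              (s2, st.2 + 1)
            else (st.1, st.2 + 1)
          else (st.1, 0))
        (score, 0)).1))
    0)

-- ===== PORT B =====
def twos_to_fours_vertical_py_alt (board : List (List String)) (piece : String) : Int :=
  ((PySem.List.pyRange 0 (((PySem.List.pyGet? board 0).getD []).length : Int) 1).foldl
    (fun (score : Int) (col : Int) =>
      ((PySem.List.pyRange 0 ((board.length : Int) - 3) 1).foldl
        (fun (sc : Int) (top : Int) =>
          let w := [pvCell board top col, pvCell board (top + 1) col, pvCell board (top + 2) col, pvCell board (top + 3) col]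
          let sc := if w = [piece, piece, "", piece] then sc + 1 else sc
          if w = [piece, "", piece, piece] then sc + 1 else sc)
        score))
    0)

-- ===== PRECONDITION & SPEC =====
-- Pre_ excludes exactly the inputs where Python's A raises IndexError:
-- the empty board (board[0]) and boards with a row shorter than row 0 (board[row][col]).
def Pre_twos_to_fours_vertical_py (board : List (List String)) (piece : String) : Prop :=
  board ≠ [] ∧ ∀ r ∈ board, (board.headD []).length ≤ r.length
instance (board : List (List String)) (piece : String) : Decidable (Pre_twos_to_fours_vertical_py board piece) := by unfold Pre_twos_to_fours_vertical_py; infer_instance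

def pvWitness_twos_to_fours_vertical_py : List (List String) × String :=
  ([["X"], ["X"], [""], ["X"]], "X")

def Spec_twos_to_fours_vertical_py (board : List (List String)) (piece : String) (out : Int) : Prop := out = twos_to_fours_vertical_py_alt board piece
instance (board : List (List String)) (piece : String) (out : Int) : Decidable (Spec_twos_to_fours_vertical_py board piece out) := by unfold Spec_twos_to_fours_vertical_py; infer_instance

-- ===== CLAIM (what is proved, stated in full; the proofs are below) =====
def Claim_equal_twos_to_fours_vertical_py : Prop := ∀ (board : List (List String)) (piece : String), Dom_twos_to_fours_vertical_py board piece → Pre_twos_to_fours_vertical_py board piece → Spec_twos_to_fours_vertical_py board piece (twos_to_fours_vertical_py board piece)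

-- ===== LEMMAS AND PROOFS =====

-- abstract, Nat-indexed versions of the two inner loops (one column, cells c : Nat → String)

def pvRunLen (c : Nat → String) (p : String) : Nat → Int
  | 0 => 0
  | n + 1 => if c n = p then pvRunLen c p n + 1 else 0

def pvIndA (c : Nat → String) (p : String) (t : Nat) : Int :=
  if c t = p ∧ c (t + 1) = p ∧ c (t + 2) = "" ∧ c (t + 3) = p then 1 else 0

def pvIndB (c : Nat → String) (p : String) (t : Nat) : Int :=
  if c t = p ∧ c (t + 1) = "" ∧ c (t + 2) = p ∧ c (t + 3) = p then 1 else 0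

def pvContrib (c : Nat → String) (p : String) (N k : Nat) : Int :=
  (if 1 ≤ k ∧ k + 2 < N then pvIndA c p (k - 1) else 0)
  + (if 3 ≤ k ∧ k < N then pvIndB c p (k - 3) else 0)

def pvStepA (c : Nat → String) (p : String) (N : Nat) (st : Int × Int) (k : Nat) : Int × Int :=
  if c k = p then
    if st.2 + 1 ≥ 2 then
      let s1 := if k + 2 < N ∧ c (k + 1) = "" ∧ c (k + 2) = p then st.1 + 1 else st.1
      let s2 := if 3 ≤ k ∧ c (k - 2) = "" ∧ c (k - 3) = p then s1 + 1 else s1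
      (s2, st.2 + 1)
    else (st.1, st.2 + 1)
  else (st.1, 0)

lemma pvRunLen_nonneg (c : Nat → String) (p : String) (n : Nat) : 0 ≤ pvRunLen c p n := by
  induction n with
  | zero => simp [pvRunLen]
  | succ m ih => by_cases h : c m = p <;> simp [pvRunLen, h] <;> try omega

lemma pvRunLen_pos (c : Nat → String) (p : String) (n : Nat) :
    1 ≤ pvRunLen c p n ↔ 1 ≤ n ∧ c (n - 1) = p := by
  cases n with
  | zero => simp [pvRunLen]
  | succ m =>
    have := pvRunLen_nonneg c p m
    by_cases h : c m = p <;> simp [pvRunLen, h] <;> try omega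

lemma pvStepA_char (c : Nat → String) (p : String) (N n : Nat) (hn : n < N) (s S : Int) :
    pvStepA c p N (s + S, pvRunLen c p n) n = (s + S + pvContrib c p N n, pvRunLen c p (n + 1)) := by
  by_cases hc : c n = p
  · by_cases hge : 1 ≤ pvRunLen c p n
    · have hprev : 1 ≤ n ∧ c (n - 1) = p := (pvRunLen_pos c p n).1 hge
      have h2 : pvRunLen c p n + 1 ≥ 2 := by omega
      have hA : (if 1 ≤ n ∧ n + 2 < N then pvIndA c p (n - 1) else 0)
          = (if n + 2 < N ∧ c (n + 1) = "" ∧ c (n + 2) = p then 1 else 0) := by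
        by_cases hb : n + 2 < N
        · rw [if_pos (⟨hprev.1, hb⟩ : 1 ≤ n ∧ n + 2 < N)]
          have e1 : n - 1 + 1 = n := by omega
          have e2 : n - 1 + 2 = n + 1 := by omega
          have e3 : n - 1 + 3 = n + 2 := by omega
          simp only [pvIndA, e1, e2, e3]
          apply if_congr _ rfl rfl
          constructor
          · rintro ⟨_, _, u, v⟩; exact ⟨hb, u, v⟩
          · rintro ⟨_, u, v⟩; exact ⟨hprev.2, hc, u, v⟩
        · rw [if_neg (fun h => hb h.2), if_neg (fun h => hb h.1)]
      have hB : (if 3 ≤ n ∧ n < N then pvIndB c p (n - 3) else 0)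
          = (if 3 ≤ n ∧ c (n - 2) = "" ∧ c (n - 3) = p then 1 else 0) := by
        by_cases h3 : 3 ≤ n
        · rw [if_pos (⟨h3, hn⟩ : 3 ≤ n ∧ n < N)]
          have e1 : n - 3 + 1 = n - 2 := by omega
          have e2 : n - 3 + 2 = n - 1 := by omega
          have e3 : n - 3 + 3 = n := by omega
          simp only [pvIndB, e1, e2, e3]
          apply if_congr _ rfl rfl
          constructor
          · rintro ⟨u, v, _, _⟩; exact ⟨h3, v, u⟩
          · rintro ⟨_, v, u⟩; exact ⟨u, v, hprev.2, hc⟩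
        · rw [if_neg (fun h => h3 h.1), if_neg (fun h => h3 h.1)]
      simp only [pvStepA, pvRunLen, hc, h2, if_true, Prod.mk.injEq]
      refine ⟨?_, trivial⟩
      unfold pvContrib
      rw [hA, hB]
      split_ifs <;> omega
    · have hprev : ¬ (1 ≤ n ∧ c (n - 1) = p) := fun h => hge ((pvRunLen_pos c p n).2 h)
      have h2 : ¬ (pvRunLen c p n + 1 ≥ 2) := by omega
      have hzero : pvContrib c p N n = 0 := by
        by_cases h1 : 1 ≤ n
        · have hcm : c (n - 1) ≠ p := fun h => hprev ⟨h1, h⟩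
          have hA0 : pvIndA c p (n - 1) = 0 := by
            rw [pvIndA, if_neg]; exact fun h => hcm h.1
          by_cases h3 : 3 ≤ n
          · have hB0 : pvIndB c p (n - 3) = 0 := by
              rw [pvIndB, if_neg]
              intro h
              have e : n - 3 + 2 = n - 1 := by omega
              rw [e] at h
              exact hcm h.2.2.1
            simp [pvContrib, hA0, hB0]
          · simp [pvContrib, hA0, h3]
        · simp [pvContrib, h1, show ¬ 3 ≤ n by omega]
      simp [pvStepA, pvRunLen, hc, h2, hzero]
  · have hzero : pvContrib c p N n = 0 := by
      by_cases h1 : 1 ≤ n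
      · have hA0 : pvIndA c p (n - 1) = 0 := by
          rw [pvIndA, if_neg]
          intro h
          have e : n - 1 + 1 = n := by omega
          rw [e] at h
          exact hc h.2.1
        by_cases h3 : 3 ≤ n
        · have hB0 : pvIndB c p (n - 3) = 0 := by
            rw [pvIndB, if_neg]
            intro h
            have e : n - 3 + 3 = n := by omega
            rw [e] at h
            exact hc h.2.2.2
          simp [pvContrib, hA0, hB0]
        · simp [pvContrib, hA0, h3]
      · simp [pvContrib, h1, show ¬ 3 ≤ n by omega]
    simp [pvStepA, pvRunLen, hc, hzero]

lemma pvFoldA (c : Nat → String) (p : String) (N : Nat) :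
    ∀ n, n ≤ N → ∀ s : Int,
      (List.range n).foldl (pvStepA c p N) (s, 0)
        = (s + ∑ k ∈ Finset.range n, pvContrib c p N k, pvRunLen c p n) := by
  intro n
  induction n with
  | zero => intro _ s; simp [pvRunLen]
  | succ m ih =>
    intro hle s
    rw [List.range_succ, List.foldl_append, ih (by omega) s]
    simp only [List.foldl_cons, List.foldl_nil]
    rw [pvStepA_char c p N m (by omega) s _]
    rw [Finset.sum_range_succ, ← add_assoc]

lemma pvFoldB (c : Nat → String) (p : String) :
    ∀ (m : Nat) (s : Int),
      (List.range m).foldl (fun sc t => sc + pvIndA c p t + pvIndB c p t) s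
        = s + ∑ t ∈ Finset.range m, (pvIndA c p t + pvIndB c p t) := by
  intro m
  induction m with
  | zero => intro s; simp
  | succ k ih =>
    intro s
    rw [List.range_succ, List.foldl_append, ih s]
    simp only [List.foldl_cons, List.foldl_nil]
    rw [Finset.sum_range_succ]
    ring

lemma pvSum_eq (c : Nat → String) (p : String) (N : Nat) :
    ∑ k ∈ Finset.range N, pvContrib c p N k
      = ∑ t ∈ Finset.range (N - 3), (pvIndA c p t + pvIndB c p t) := by
  unfold pvContrib
  rw [Finset.sum_add_distrib, Finset.sum_add_distrib]
  congr 1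
  · have h1 : ∀ k, (if 1 ≤ k ∧ k + 2 < N then pvIndA c p (k - 1) else 0)
        = (if k ∈ Finset.Ico 1 (N - 2) then pvIndA c p (k - 1) else 0) := by
      intro k
      have : (1 ≤ k ∧ k + 2 < N) ↔ k ∈ Finset.Ico 1 (N - 2) := by
        rw [Finset.mem_Ico]; omega
      simp only [this]
    simp only [h1]
    rw [Finset.sum_ite_mem]
    have hsub : Finset.Ico 1 (N - 2) ⊆ Finset.range N := by
      intro k hk
      rw [Finset.mem_Ico] at hk
      rw [Finset.mem_range]
      omega
    rw [Finset.inter_eq_right.2 hsub]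
    rw [Finset.sum_Ico_eq_sum_range]
    have : N - 2 - 1 = N - 3 := by omega
    rw [this]
    apply Finset.sum_congr rfl
    intro i _
    congr 1
    omega
  · have h1 : ∀ k, (if 3 ≤ k ∧ k < N then pvIndB c p (k - 3) else 0)
        = (if k ∈ Finset.Ico 3 N then pvIndB c p (k - 3) else 0) := by
      intro k
      have : (3 ≤ k ∧ k < N) ↔ k ∈ Finset.Ico 3 N := by
        rw [Finset.mem_Ico]
      simp only [this]
    simp only [h1]
    rw [Finset.sum_ite_mem]
    have hsub : Finset.Ico 3 N ⊆ Finset.range N := by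
      intro k hk
      rw [Finset.mem_Ico] at hk
      rw [Finset.mem_range]
      omega
    rw [Finset.inter_eq_right.2 hsub]
    rw [Finset.sum_Ico_eq_sum_range]
    apply Finset.sum_congr rfl
    intro i _
    congr 1
    omega

-- bridge: the Int-indexed port steps are the Nat-indexed abstract steps

lemma pvStepA_cast (board : List (List String)) (piece : String) (col : Int) (st : Int × Int) (k : Nat) :
    (fun (st : Int × Int) (row : Int) =>
      if pvCell board row col = piece then
        if st.2 + 1 ≥ 2 then
          let s1 := if row + 2 < (board.length : Int) ∧ pvCell board (row + 1) col = "" ∧ pvCell board (row + 2) col = piece then st.1 + 1 else st.1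
          let s2 := if row - 3 ≥ 0 ∧ pvCell board (row - 2) col = "" ∧ pvCell board (row - 3) col = piece then s1 + 1 else s1
          (s2, st.2 + 1)
        else (st.1, st.2 + 1)
      else (st.1, 0)) st (k : Int)
    = pvStepA (fun r => pvCell board (r : Int) col) piece board.length st k := by
  have e1 : (k : Int) + 1 = ((k + 1 : Nat) : Int) := by push_cast; ring
  have e2 : (k : Int) + 2 = ((k + 2 : Nat) : Int) := by push_cast; ring
  have hb' : (((k + 2 : Nat) : Int) < (board.length : Int)) ↔ k + 2 < board.length := by omega
  by_cases h3 : 3 ≤ k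
  · have f2 : (k : Int) - 2 = ((k - 2 : Nat) : Int) := by omega
    have f3 : (k : Int) - 3 = ((k - 3 : Nat) : Int) := by omega
    have hk3' : (((k - 3 : Nat) : Int) ≥ 0) ↔ 3 ≤ k := by omega
    simp only [pvStepA, e1, e2, f2, f3, hb', hk3']
  · have hk3 : ¬ ((k : Int) - 3 ≥ 0) := by omega
    simp only [pvStepA, e1, e2, hb']
    simp [h3]

lemma pvStepB_cast (board : List (List String)) (piece : String) (col : Int) (sc : Int) (t : Nat) :
    (fun (sc : Int) (top : Int) =>
      let w := [pvCell board top col, pvCell board (top + 1) col, pvCell board (top + 2) col, pvCell board (top + 3) col]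
      let sc := if w = [piece, piece, "", piece] then sc + 1 else sc
      if w = [piece, "", piece, piece] then sc + 1 else sc) sc (t : Int)
    = sc + pvIndA (fun r => pvCell board (r : Int) col) piece t
         + pvIndB (fun r => pvCell board (r : Int) col) piece t := by
  have e1 : (t : Int) + 1 = ((t + 1 : Nat) : Int) := by push_cast; ring
  have e2 : (t : Int) + 2 = ((t + 2 : Nat) : Int) := by push_cast; ring
  have e3 : (t : Int) + 3 = ((t + 3 : Nat) : Int) := by push_cast; ring
  simp only [e1, e2, e3, pvIndA, pvIndB, List.cons.injEq, and_true]
  split_ifs <;> simp_all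

lemma pvCol_eq (board : List (List String)) (piece : String) (col : Int) (s : Int) :
    ((PySem.List.pyRange 0 (board.length : Int) 1).foldl
        (fun (st : Int × Int) (row : Int) =>
          if pvCell board row col = piece then
            if st.2 + 1 ≥ 2 then
              let s1 := if row + 2 < (board.length : Int) ∧ pvCell board (row + 1) col = "" ∧ pvCell board (row + 2) col = piece then st.1 + 1 else st.1
              let s2 := if row - 3 ≥ 0 ∧ pvCell board (row - 2) col = "" ∧ pvCell board (row - 3) col = piece then s1 + 1 else s1
              (s2, st.2 + 1)
            else (st.1, st.2 + 1)
          else (st.1, 0))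
        (s, 0)).1
    = (PySem.List.pyRange 0 ((board.length : Int) - 3) 1).foldl
        (fun (sc : Int) (top : Int) =>
          let w := [pvCell board top col, pvCell board (top + 1) col, pvCell board (top + 2) col, pvCell board (top + 3) col]
          let sc := if w = [piece, piece, "", piece] then sc + 1 else sc
          if w = [piece, "", piece, piece] then sc + 1 else sc)
        s := by
  set c : Nat → String := fun r => pvCell board (r : Int) col with hc
  have hrangeA : PySem.List.pyRange 0 (board.length : Int) 1
      = (List.range board.length).map (fun k : Nat => (k : Int)) := by
    rw [PySem.List.pyRange_one]
    have : ((board.length : Int) - 0).toNat = board.length := by omega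
    rw [this]
    simp
  have hrangeB : PySem.List.pyRange 0 ((board.length : Int) - 3) 1
      = (List.range (board.length - 3)).map (fun k : Nat => (k : Int)) := by
    rw [PySem.List.pyRange_one]
    have : ((board.length : Int) - 3 - 0).toNat = board.length - 3 := by omega
    rw [this]
    simp
  rw [hrangeA, hrangeB, List.foldl_map, List.foldl_map]
  have hA : (fun (st : Int × Int) (k : Nat) =>
      (fun (st : Int × Int) (row : Int) =>
        if pvCell board row col = piece then
          if st.2 + 1 ≥ 2 then
            let s1 := if row + 2 < (board.length : Int) ∧ pvCell board (row + 1) col = "" ∧ pvCell board (row + 2) col = piece then st.1 + 1 else st.1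
            let s2 := if row - 3 ≥ 0 ∧ pvCell board (row - 2) col = "" ∧ pvCell board (row - 3) col = piece then s1 + 1 else s1
            (s2, st.2 + 1)
          else (st.1, st.2 + 1)
        else (st.1, 0)) st (k : Int))
      = pvStepA c piece board.length := by
    funext st k
    exact pvStepA_cast board piece col st k
  have hB : (fun (sc : Int) (k : Nat) =>
      (fun (sc : Int) (top : Int) =>
        let w := [pvCell board top col, pvCell board (top + 1) col, pvCell board (top + 2) col, pvCell board (top + 3) col]
        let sc := if w = [piece, piece, "", piece] then sc + 1 else sc
        if w = [piece, "", piece, piece] then sc + 1 else sc) sc (k : Int))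
      = (fun (sc : Int) (t : Nat) => sc + pvIndA c piece t + pvIndB c piece t) := by
    funext sc k
    exact pvStepB_cast board piece col sc k
  rw [hA, hB]
  rw [pvFoldA c piece board.length board.length le_rfl s]
  rw [pvFoldB c piece (board.length - 3) s]
  simp only [pvSum_eq c piece board.length]

-- ===== VERDICT (by name: the statement is the Claim_ definition above) =====
theorem twos_to_fours_vertical_py_spec : Claim_equal_twos_to_fours_vertical_py := by
  intro board piece _ _
  unfold Spec_twos_to_fours_vertical_py twos_to_fours_vertical_py twos_to_fours_vertical_py_alt
  apply PySem.List.foldl_congr_mem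
  intro score col _
  exact pvCol_eq board piece col score
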